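-- pv_equiv track=rewrite | github.com/PHemarajata/afi_terra | scripts/compare_single_double_outputs.py | compare_routine
-- ===== SOURCE A (Python) =====
-- def normalize_text(value: str | None) -> str:
--     return (value or "").strip()
--
-- def normalize_taxa_csv(value: str | None) -> str:
--     items = [x.strip() for x in (value or "").split(",") if x.strip()]
--     return ",".join(sorted(set(items)))
--
-- def compare_routine(single: dict[str, dict[str, str]], double: dict[str, dict[str, str]]) -> list[dict[str, str]]:
--     all_samples = sorted(set(single) | set(double))
--     diffs: list[dict[str, str]] = []
--
--     for sample_id in all_samples:
--         s = single.get(sample_id)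
--         d = double.get(sample_id)
--
--         if s is None:
--             diffs.append({"sample_id": sample_id, "status": "only_in_double"})
--             continue
--         if d is None:
--             diffs.append({"sample_id": sample_id, "status": "only_in_single"})
--             continue
--
--         s_taxa = normalize_taxa_csv(s.get("taxa_present"))
--         d_taxa = normalize_taxa_csv(d.get("taxa_present"))
--         s_n = normalize_text(s.get("n_taxa_present"))
--         d_n = normalize_text(d.get("n_taxa_present"))
--
--         if s_taxa != d_taxa or s_n != d_n:
--             diffs.append(
--                 {
--                     "sample_id": sample_id,
--                     "status": "changed",
--                     "single_n_taxa_present": s_n,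
--                     "double_n_taxa_present": d_n,
--                     "single_taxa_present": s_taxa,
--                     "double_taxa_present": d_taxa,
--                     "single_sample_type": normalize_text(s.get("sample_type")),
--                     "double_sample_type": normalize_text(d.get("sample_type")),
--                 }
--             )
--
--     return diffs
-- ===== SOURCE B (Python) =====
-- def normalize_text(value):
--     return (value or "").strip()
--
-- def normalize_taxa_csv(value):
--     items = [x.strip() for x in (value or "").split(",") if x.strip()]
--     return ",".join(sorted(set(items)))
--
-- def compare_routine(single, double):
--     # sort-merge join: walk the two key-sorted item lists with two pointers;
--     # output comes out already sorted, no key-union set and no dict lookups.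
--     s_items = sorted(single.items(), key=lambda kv: kv[0])
--     d_items = sorted(double.items(), key=lambda kv: kv[0])
--     i, j, out = 0, 0, []
--     while i < len(s_items) and j < len(d_items):
--         (sk, sv), (dk, dv) = s_items[i], d_items[j]
--         if sk < dk:
--             out.append({"sample_id": sk, "status": "only_in_single"})
--             i += 1
--         elif dk < sk:
--             out.append({"sample_id": dk, "status": "only_in_double"})
--             j += 1
--         else:
--             s_taxa = normalize_taxa_csv(sv.get("taxa_present"))
--             d_taxa = normalize_taxa_csv(dv.get("taxa_present"))
--             s_n = normalize_text(sv.get("n_taxa_present"))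
--             d_n = normalize_text(dv.get("n_taxa_present"))
--             if s_taxa != d_taxa or s_n != d_n:
--                 out.append({
--                     "sample_id": sk,
--                     "status": "changed",
--                     "single_n_taxa_present": s_n,
--                     "double_n_taxa_present": d_n,
--                     "single_taxa_present": s_taxa,
--                     "double_taxa_present": d_taxa,
--                     "single_sample_type": normalize_text(sv.get("sample_type")),
--                     "double_sample_type": normalize_text(dv.get("sample_type")),
--                 })
--             i += 1
--             j += 1
--     out += [{"sample_id": kv[0], "status": "only_in_single"} for kv in s_items[i:]]
--     out += [{"sample_id": kv[0], "status": "only_in_double"} for kv in d_items[j:]]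
--     return out
-- ===== Notes on version B (the rewrite author's own statement) =====
-- stated objective: alternative
-- what changed: B is a sort-merge join: it sorts the two item lists by key once and walks them with two pointers, classifying each step (key only left, only right, or common-and-changed) and emitting output already in sorted order, instead of A's dispatch loop that builds a key-union set, sorts it, and does two dict lookups per key.
import Mathlib
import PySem

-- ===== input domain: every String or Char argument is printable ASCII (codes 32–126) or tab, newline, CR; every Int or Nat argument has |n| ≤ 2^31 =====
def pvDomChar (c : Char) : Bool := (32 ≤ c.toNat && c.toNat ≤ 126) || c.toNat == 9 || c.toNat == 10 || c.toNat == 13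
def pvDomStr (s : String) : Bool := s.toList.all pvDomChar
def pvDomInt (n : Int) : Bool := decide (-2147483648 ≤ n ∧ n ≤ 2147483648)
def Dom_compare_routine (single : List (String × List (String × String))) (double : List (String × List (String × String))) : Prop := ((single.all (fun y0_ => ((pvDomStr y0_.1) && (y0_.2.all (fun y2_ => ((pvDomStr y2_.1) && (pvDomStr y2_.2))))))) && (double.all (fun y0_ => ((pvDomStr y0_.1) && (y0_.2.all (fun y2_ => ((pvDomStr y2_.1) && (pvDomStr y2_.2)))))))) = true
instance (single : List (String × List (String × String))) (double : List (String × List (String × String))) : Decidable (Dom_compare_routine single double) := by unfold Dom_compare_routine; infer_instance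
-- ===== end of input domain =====

-- B replaces A's key-union dispatch loop (build union set, sort it, two dict lookups per key) by a
-- sort-merge join: both item lists sorted by key once, then a two-pointer merge emitting the diffs.
-- Shared helpers of both Pythons (normalize_text / normalize_taxa_csv), ported once:
def pvNormText (v : Option String) : String := PySem.Str.strip (v.getD "")

def pvNormTaxa (v : Option String) : String :=
  -- sep "," is nonempty, so split? is always `some`; getD [] is exact
  let parts := (PySem.Str.split? (v.getD "") ",").getD []
  let items := (parts.filter (fun x => PySem.Str.strip x ≠ "")).map PySem.Str.strip
  PySem.Str.join "," (PySem.List.sorted (PySem.Set.ofList items) (fun x => x))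

-- ===== PORT A =====
def compare_routine (single : List (String × List (String × String))) (double : List (String × List (String × String))) : List (List (String × String)) :=
  let sd := PySem.Dict.ofList single
  let dd := PySem.Dict.ofList double
  let allSamples := PySem.List.sorted ((PySem.Set.ofList sd.keys).union (PySem.Set.ofList dd.keys)) (fun x => x)
  allSamples.foldl (fun diffs sample_id =>
    match sd.get? sample_id with
    | none => diffs ++ [[("sample_id", sample_id), ("status", "only_in_double")]]
    | some s =>
      match dd.get? sample_id with
      | none => diffs ++ [[("sample_id", sample_id), ("status", "only_in_single")]]
      | some d =>
        let si := PySem.Dict.ofList s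
        let di := PySem.Dict.ofList d
        let s_taxa := pvNormTaxa (si.get? "taxa_present")
        let d_taxa := pvNormTaxa (di.get? "taxa_present")
        let s_n := pvNormText (si.get? "n_taxa_present")
        let d_n := pvNormText (di.get? "n_taxa_present")
        if s_taxa ≠ d_taxa ∨ s_n ≠ d_n then
          diffs ++ [[("sample_id", sample_id), ("status", "changed"),
                     ("single_n_taxa_present", s_n), ("double_n_taxa_present", d_n),
                     ("single_taxa_present", s_taxa), ("double_taxa_present", d_taxa),
                     ("single_sample_type", pvNormText (si.get? "sample_type")),
                     ("double_sample_type", pvNormText (di.get? "sample_type"))]]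
        else diffs) []

-- ===== PORT B =====
-- Source B's two-pointer while loop over the two sorted item lists, as the recursion on the two suffixes
-- the pointers denote; the two trailing list-comprehension appends are the base cases.
def pvMerge : List (String × List (String × String)) → List (String × List (String × String)) → List (List (String × String))
  | [], d => d.map (fun kv => [("sample_id", kv.1), ("status", "only_in_double")])
  | (sk, sv) :: s, [] => [("sample_id", sk), ("status", "only_in_single")] :: pvMerge s []
  | (sk, sv) :: s, (dk, dv) :: d =>
    if sk < dk then
      [("sample_id", sk), ("status", "only_in_single")] :: pvMerge s ((dk, dv) :: d)
    else if dk < sk then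
      [("sample_id", dk), ("status", "only_in_double")] :: pvMerge ((sk, sv) :: s) d
    else
      let si := PySem.Dict.ofList sv
      let di := PySem.Dict.ofList dv
      let s_taxa := pvNormTaxa (si.get? "taxa_present")
      let d_taxa := pvNormTaxa (di.get? "taxa_present")
      let s_n := pvNormText (si.get? "n_taxa_present")
      let d_n := pvNormText (di.get? "n_taxa_present")
      if s_taxa ≠ d_taxa ∨ s_n ≠ d_n then
        [("sample_id", sk), ("status", "changed"),
         ("single_n_taxa_present", s_n), ("double_n_taxa_present", d_n),
         ("single_taxa_present", s_taxa), ("double_taxa_present", d_taxa),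
         ("single_sample_type", pvNormText (si.get? "sample_type")),
         ("double_sample_type", pvNormText (di.get? "sample_type"))] :: pvMerge s d
      else pvMerge s d
  termination_by a b => a.length + b.length

def compare_routine_alt (single : List (String × List (String × String))) (double : List (String × List (String × String))) : List (List (String × String)) :=
  let s_items := PySem.List.sorted (PySem.Dict.ofList single).items (fun kv => kv.1)
  let d_items := PySem.List.sorted (PySem.Dict.ofList double).items (fun kv => kv.1)
  pvMerge s_items d_items

-- ===== PRECONDITION & SPEC =====
def Spec_compare_routine (single : List (String × List (String × String))) (double : List (String × List (String × String))) (out : List (List (String × String))) : Prop := out = compare_routine_alt single double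
instance (single : List (String × List (String × String))) (double : List (String × List (String × String))) (out : List (List (String × String))) : Decidable (Spec_compare_routine single double out) := by unfold Spec_compare_routine; infer_instance

-- ===== CLAIM (what is proved, stated in full; the proofs are below) =====
def Claim_equal_compare_routine : Prop := ∀ (single : List (String × List (String × String))) (double : List (String × List (String × String))), Dom_compare_routine single double → Spec_compare_routine single double (compare_routine single double)

-- ===== LEMMAS AND PROOFS =====

-- the per-key entry A's dispatch loop appends (none = no entry)
def pvF (single double : List (String × List (String × String))) (sample_id : String) : Option (List (String × String)) :=
  match (PySem.Dict.ofList single).get? sample_id with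
  | none => some [("sample_id", sample_id), ("status", "only_in_double")]
  | some s =>
    match (PySem.Dict.ofList double).get? sample_id with
    | none => some [("sample_id", sample_id), ("status", "only_in_single")]
    | some d =>
      let si := PySem.Dict.ofList s
      let di := PySem.Dict.ofList d
      let s_taxa := pvNormTaxa (si.get? "taxa_present")
      let d_taxa := pvNormTaxa (di.get? "taxa_present")
      let s_n := pvNormText (si.get? "n_taxa_present")
      let d_n := pvNormText (di.get? "n_taxa_present")
      if s_taxa ≠ d_taxa ∨ s_n ≠ d_n then
        some [("sample_id", sample_id), ("status", "changed"),
              ("single_n_taxa_present", s_n), ("double_n_taxa_present", d_n),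
              ("single_taxa_present", s_taxa), ("double_taxa_present", d_taxa),
              ("single_sample_type", pvNormText (si.get? "sample_type")),
              ("double_sample_type", pvNormText (di.get? "sample_type"))]
      else none

theorem pvA_foldl (single double : List (String × List (String × String))) (l : List String) (acc : List (List (String × String))) :
    l.foldl (fun diffs sample_id =>
      match (PySem.Dict.ofList single).get? sample_id with
      | none => diffs ++ [[("sample_id", sample_id), ("status", "only_in_double")]]
      | some s =>
        match (PySem.Dict.ofList double).get? sample_id with
        | none => diffs ++ [[("sample_id", sample_id), ("status", "only_in_single")]]
        | some d =>
          let si := PySem.Dict.ofList s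
          let di := PySem.Dict.ofList d
          let s_taxa := pvNormTaxa (si.get? "taxa_present")
          let d_taxa := pvNormTaxa (di.get? "taxa_present")
          let s_n := pvNormText (si.get? "n_taxa_present")
          let d_n := pvNormText (di.get? "n_taxa_present")
          if s_taxa ≠ d_taxa ∨ s_n ≠ d_n then
            diffs ++ [[("sample_id", sample_id), ("status", "changed"),
                       ("single_n_taxa_present", s_n), ("double_n_taxa_present", d_n),
                       ("single_taxa_present", s_taxa), ("double_taxa_present", d_taxa),
                       ("single_sample_type", pvNormText (si.get? "sample_type")),
                       ("double_sample_type", pvNormText (di.get? "sample_type"))]]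
          else diffs) acc
    = acc ++ l.filterMap (pvF single double) := by
  induction l generalizing acc with
  | nil => simp
  | cons k t ih =>
    rw [List.foldl_cons, List.filterMap_cons, ih]
    rcases h1 : (PySem.Dict.ofList single).get? k with _ | s
    · have hfk : pvF single double k = some [("sample_id", k), ("status", "only_in_double")] := by
        simp only [pvF, h1]
      simp [hfk]
    · rcases h2 : (PySem.Dict.ofList double).get? k with _ | d
      · have hfk : pvF single double k = some [("sample_id", k), ("status", "only_in_single")] := by
          simp only [pvF, h1, h2]
        simp [hfk]
      · by_cases hc : pvNormTaxa ((PySem.Dict.ofList s).get? "taxa_present") ≠ pvNormTaxa ((PySem.Dict.ofList d).get? "taxa_present") ∨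
            pvNormText ((PySem.Dict.ofList s).get? "n_taxa_present") ≠ pvNormText ((PySem.Dict.ofList d).get? "n_taxa_present")
        · have hfk : pvF single double k = some [("sample_id", k), ("status", "changed"),
              ("single_n_taxa_present", pvNormText ((PySem.Dict.ofList s).get? "n_taxa_present")),
              ("double_n_taxa_present", pvNormText ((PySem.Dict.ofList d).get? "n_taxa_present")),
              ("single_taxa_present", pvNormTaxa ((PySem.Dict.ofList s).get? "taxa_present")),
              ("double_taxa_present", pvNormTaxa ((PySem.Dict.ofList d).get? "taxa_present")),
              ("single_sample_type", pvNormText ((PySem.Dict.ofList s).get? "sample_type")),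
              ("double_sample_type", pvNormText ((PySem.Dict.ofList d).get? "sample_type"))] := by
            simp only [pvF, h1, h2, if_pos hc]
          simp [hfk, hc]
        · have hfk : pvF single double k = none := by
            simp only [pvF, h1, h2, if_neg hc]
          simp [hfk, hc]

-- first-match association lookup in a raw pair list (what the merge's head inspection amounts to)
def pvLook : List (String × List (String × String)) → String → Option (List (String × String))
  | [], _ => none
  | (k, v) :: t, x => if k = x then some v else pvLook t x

-- the per-key entry expressed through pvLook on the two item lists
def pvFL (a b : List (String × List (String × String))) (sample_id : String) : Option (List (String × String)) :=
  match pvLook a sample_id with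
  | none => some [("sample_id", sample_id), ("status", "only_in_double")]
  | some s =>
    match pvLook b sample_id with
    | none => some [("sample_id", sample_id), ("status", "only_in_single")]
    | some d =>
      let si := PySem.Dict.ofList s
      let di := PySem.Dict.ofList d
      let s_taxa := pvNormTaxa (si.get? "taxa_present")
      let d_taxa := pvNormTaxa (di.get? "taxa_present")
      let s_n := pvNormText (si.get? "n_taxa_present")
      let d_n := pvNormText (di.get? "n_taxa_present")
      if s_taxa ≠ d_taxa ∨ s_n ≠ d_n then
        some [("sample_id", sample_id), ("status", "changed"),
              ("single_n_taxa_present", s_n), ("double_n_taxa_present", d_n),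
              ("single_taxa_present", s_taxa), ("double_taxa_present", d_taxa),
              ("single_sample_type", pvNormText (si.get? "sample_type")),
              ("double_sample_type", pvNormText (di.get? "sample_type"))]
      else none

-- key merge of two sorted key lists (the key trace of pvMerge)
def pvMergeK : List String → List String → List String
  | [], b => b
  | x :: a, [] => x :: pvMergeK a []
  | x :: a, y :: b =>
    if x < y then x :: pvMergeK a (y :: b)
    else if y < x then y :: pvMergeK (x :: a) b
    else x :: pvMergeK a b
  termination_by a b => a.length + b.length

theorem mem_pvMergeK (a b : List String) (k : String) : k ∈ pvMergeK a b ↔ k ∈ a ∨ k ∈ b := by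
  fun_induction pvMergeK a b with
  | case1 b => simp
  | case2 x a ih => simp [ih]
  | case3 x a y b h ih => simp [h, ih]; tauto
  | case4 x a y b h h' ih => simp [h, h', ih]; tauto
  | case5 x a y b h h' ih =>
    have hxy : x = y := le_antisymm (le_of_not_gt h') (le_of_not_gt h)
    simp [h, h', ih, hxy]; tauto

theorem pairwise_pvMergeK (a b : List String) (ha : a.Pairwise (· < ·)) (hb : b.Pairwise (· < ·)) :
    (pvMergeK a b).Pairwise (· < ·) := by
  fun_induction pvMergeK a b with
  | case1 b => simpa using hb
  | case2 x a ih =>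
    rw [List.pairwise_cons]
    rcases List.pairwise_cons.mp ha with ⟨hx, ha'⟩
    exact ⟨fun k hk => by
      rcases (mem_pvMergeK a [] k).mp hk with h | h
      · exact hx k h
      · simp at h, ih ha' hb⟩
  | case3 x a y b h ih =>
    rw [List.pairwise_cons]
    rcases List.pairwise_cons.mp ha with ⟨hx, ha'⟩
    rcases List.pairwise_cons.mp hb with ⟨hy, hb'⟩
    refine ⟨fun k hk => ?_, ih ha' hb⟩
    rcases (mem_pvMergeK a (y :: b) k).mp hk with hm | hm
    · exact hx k hm
    · rcases List.mem_cons.mp hm with rfl | hm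
      · exact h
      · exact lt_trans h (hy k hm)
  | case4 x a y b h h' ih =>
    rw [List.pairwise_cons]
    rcases List.pairwise_cons.mp ha with ⟨hx, ha'⟩
    rcases List.pairwise_cons.mp hb with ⟨hy, hb'⟩
    refine ⟨fun k hk => ?_, ih ha hb'⟩
    rcases (mem_pvMergeK (x :: a) b k).mp hk with hm | hm
    · rcases List.mem_cons.mp hm with rfl | hm
      · exact h'
      · exact lt_trans h' (hx k hm)
    · exact hy k hm
  | case5 x a y b h h' ih =>
    have hxy : x = y := le_antisymm (le_of_not_gt h') (le_of_not_gt h)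
    rw [List.pairwise_cons]
    rcases List.pairwise_cons.mp ha with ⟨hx, ha'⟩
    rcases List.pairwise_cons.mp hb with ⟨hy, hb'⟩
    refine ⟨fun k hk => ?_, ih ha' hb'⟩
    rcases (mem_pvMergeK a b k).mp hk with hm | hm
    · exact hx k hm
    · exact hxy ▸ hy k hm

theorem pvLook_eq_none_of_forall (b : List (String × List (String × String))) (k : String)
    (h : ∀ p ∈ b, p.1 ≠ k) : pvLook b k = none := by
  induction b with
  | nil => rfl
  | cons p t ih =>
    obtain ⟨pk, pv⟩ := p
    rw [pvLook, if_neg (h (pk, pv) (List.mem_cons_self) )]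
    exact ih (fun q hq => h q (List.mem_cons_of_mem _ hq))

-- THE MERGE CHARACTERIZATION: on strictly key-sorted lists, the two-pointer merge is the
-- filterMap of the per-key classifier over the merged key list.
theorem pvLook_cons_self (k : String) (v : List (String × String)) (t : List (String × List (String × String))) :
    pvLook ((k, v) :: t) k = some v := by
  rw [pvLook, if_pos rfl]

theorem pvLook_cons_ne (k : String) (v : List (String × String)) (t : List (String × List (String × String)))
    (x : String) (h : k ≠ x) : pvLook ((k, v) :: t) x = pvLook t x := by
  rw [pvLook, if_neg h]

theorem pvFL_skipA (sk : String) (sv : List (String × String)) (s b : List (String × List (String × String)))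
    (k : String) (h : sk ≠ k) : pvFL ((sk, sv) :: s) b k = pvFL s b k := by
  simp only [pvFL, pvLook_cons_ne sk sv s k h]

theorem pvFL_skipB (a : List (String × List (String × String))) (dk : String) (dv : List (String × String))
    (d : List (String × List (String × String))) (k : String) (h : dk ≠ k) :
    pvFL a ((dk, dv) :: d) k = pvFL a d k := by
  simp only [pvFL, pvLook_cons_ne dk dv d k h]

theorem pvMerge_eq (a b : List (String × List (String × String)))
    (ha : (a.map Prod.fst).Pairwise (· < ·)) (hb : (b.map Prod.fst).Pairwise (· < ·)) :
    pvMerge a b = (pvMergeK (a.map Prod.fst) (b.map Prod.fst)).filterMap (pvFL a b) := by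
  fun_induction pvMerge a b with
  | case1 d =>
    simp only [List.map_nil, pvMergeK, List.filterMap_map]
    induction d with
    | nil => rfl
    | cons p t ihd => simp_all [pvFL, pvLook]
  | case2 sk sv s ih =>
    rw [List.map_cons, List.map_nil, pvMergeK, List.filterMap_cons]
    rcases List.pairwise_cons.mp ha with ⟨hx, ha'⟩
    rw [show pvFL ((sk, sv) :: s) [] sk = some [("sample_id", sk), ("status", "only_in_single")] from by
      simp only [pvFL, pvLook_cons_self]; rfl]
    rw [ih ha' (by simp)]
    congr 1
    apply List.filterMap_congr
    intro k hk
    refine (pvFL_skipA sk sv s [] k ?_).symm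
    rcases (mem_pvMergeK _ _ k).mp hk with hm | hm
    · exact ne_of_lt (hx k hm)
    · simp at hm
  | case3 sk sv s dk dv d h ih =>
    rw [List.map_cons, List.map_cons, pvMergeK, if_pos h, List.filterMap_cons]
    rcases List.pairwise_cons.mp ha with ⟨hx, ha'⟩
    rcases List.pairwise_cons.mp hb with ⟨hy, hb'⟩
    have hlookb : pvLook ((dk, dv) :: d) sk = none := by
      apply pvLook_eq_none_of_forall
      intro p hp
      rcases List.mem_cons.mp hp with rfl | hp
      · exact ne_of_gt h
      · exact ne_of_gt (lt_trans h (hy p.1 (List.mem_map.mpr ⟨p, hp, rfl⟩)))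
    rw [show pvFL ((sk, sv) :: s) ((dk, dv) :: d) sk = some [("sample_id", sk), ("status", "only_in_single")] from by
      simp only [pvFL, pvLook_cons_self, hlookb]]
    rw [ih ha' hb]
    congr 1
    apply List.filterMap_congr
    intro k hk
    refine (pvFL_skipA sk sv s _ k ?_).symm
    rcases (mem_pvMergeK _ _ k).mp hk with hm | hm
    · exact ne_of_lt (hx k hm)
    · rcases List.mem_cons.mp hm with rfl | hm
      · exact ne_of_lt h
      · exact ne_of_lt (lt_trans h (hy k hm))
  | case4 sk sv s dk dv d h h' ih =>
    rw [List.map_cons, List.map_cons, pvMergeK, if_neg h, if_pos h', List.filterMap_cons]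
    rcases List.pairwise_cons.mp ha with ⟨hx, ha'⟩
    rcases List.pairwise_cons.mp hb with ⟨hy, hb'⟩
    have hlooka : pvLook ((sk, sv) :: s) dk = none := by
      apply pvLook_eq_none_of_forall
      intro p hp
      rcases List.mem_cons.mp hp with rfl | hp
      · exact ne_of_gt h'
      · exact ne_of_gt (lt_trans h' (hx p.1 (List.mem_map.mpr ⟨p, hp, rfl⟩)))
    rw [show pvFL ((sk, sv) :: s) ((dk, dv) :: d) dk = some [("sample_id", dk), ("status", "only_in_double")] from by
      simp only [pvFL, hlooka]]
    rw [ih ha hb']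
    congr 1
    apply List.filterMap_congr
    intro k hk
    refine (pvFL_skipB _ dk dv d k ?_).symm
    rcases (mem_pvMergeK _ _ k).mp hk with hm | hm
    · rcases List.mem_cons.mp hm with rfl | hm
      · exact ne_of_lt h'
      · exact ne_of_lt (lt_trans h' (hx k hm))
    · exact ne_of_lt (hy k hm)
  | case5 sk sv s dk dv d h h' si di s_taxa d_taxa s_n d_n hc ih =>
    have hxy : sk = dk := le_antisymm (le_of_not_gt h') (le_of_not_gt h)
    rw [List.map_cons, List.map_cons, pvMergeK, if_neg h, if_neg h', List.filterMap_cons]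
    rcases List.pairwise_cons.mp ha with ⟨hx, ha'⟩
    rcases List.pairwise_cons.mp hb with ⟨hy, hb'⟩
    rw [show pvFL ((sk, sv) :: s) ((dk, dv) :: d) sk =
        some [("sample_id", sk), ("status", "changed"),
              ("single_n_taxa_present", s_n), ("double_n_taxa_present", d_n),
              ("single_taxa_present", s_taxa), ("double_taxa_present", d_taxa),
              ("single_sample_type", pvNormText (si.get? "sample_type")),
              ("double_sample_type", pvNormText (di.get? "sample_type"))] from by
      simp only [pvFL, pvLook_cons_self]
      rw [show pvLook ((dk, dv) :: d) sk = some dv from hxy ▸ pvLook_cons_self dk dv d]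
      exact if_pos hc]
    rw [ih ha' hb']
    congr 1
    apply List.filterMap_congr
    intro k hk
    have hskne : sk ≠ k := by
      rcases (mem_pvMergeK _ _ k).mp hk with hm | hm
      · exact ne_of_lt (hx k hm)
      · exact hxy ▸ ne_of_lt (hy k hm)
    rw [← pvFL_skipB s dk dv d k (hxy ▸ hskne), ← pvFL_skipA sk sv s _ k hskne]
  | case6 sk sv s dk dv d h h' si di s_taxa d_taxa s_n d_n hc ih =>
    have hxy : sk = dk := le_antisymm (le_of_not_gt h') (le_of_not_gt h)
    rw [List.map_cons, List.map_cons, pvMergeK, if_neg h, if_neg h', List.filterMap_cons]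
    rcases List.pairwise_cons.mp ha with ⟨hx, ha'⟩
    rcases List.pairwise_cons.mp hb with ⟨hy, hb'⟩
    rw [show pvFL ((sk, sv) :: s) ((dk, dv) :: d) sk = none from by
      simp only [pvFL, pvLook_cons_self]
      rw [show pvLook ((dk, dv) :: d) sk = some dv from hxy ▸ pvLook_cons_self dk dv d]
      exact if_neg hc]
    rw [ih ha' hb']
    apply List.filterMap_congr
    intro k hk
    have hskne : sk ≠ k := by
      rcases (mem_pvMergeK _ _ k).mp hk with hm | hm
      · exact ne_of_lt (hx k hm)
      · exact hxy ▸ ne_of_lt (hy k hm)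
    rw [← pvFL_skipB s dk dv d k (hxy ▸ hskne), ← pvFL_skipA sk sv s _ k hskne]

-- pvLook on a key-nodup pair list agrees with lookup in any Dict whose items are a permutation of it
theorem pvLook_of_mem_nodup (l : List (String × List (String × String))) (k : String) (v : List (String × String))
    (hnd : (l.map Prod.fst).Nodup) (hmem : (k, v) ∈ l) : pvLook l k = some v := by
  induction l with
  | nil => simp at hmem
  | cons p t ih =>
    obtain ⟨pk, pv⟩ := p
    rcases List.mem_cons.mp hmem with he | hmem'
    · obtain ⟨rfl, rfl⟩ := Prod.mk.injEq .. ▸ he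
      rw [pvLook, if_pos rfl]
    · rw [List.map_cons, List.nodup_cons] at hnd
      by_cases hk : pk = k
      · subst hk
        exact absurd (List.mem_map.mpr ⟨(pk, v), hmem', rfl⟩) hnd.1
      · rw [pvLook, if_neg hk]
        exact ih hnd.2 hmem'

theorem pvLook_sorted_items (d : PySem.Dict String (List (String × String))) (k : String) (hdnd : d.keys.Nodup) :
    pvLook (PySem.List.sorted d.items (fun kv => kv.1)) k = d.get? k := by
  have hperm : (PySem.List.sorted d.items (fun kv => kv.1)).Perm d.items := PySem.List.sorted_perm _ _ _
  have hnd : ((PySem.List.sorted d.items (fun kv => kv.1)).map Prod.fst).Nodup :=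
    ((hperm.map Prod.fst).nodup_iff).mpr hdnd
  rcases hg : d.get? k with _ | v
  · apply pvLook_eq_none_of_forall
    intro p hp he
    have : k ∈ d.keys := by
      rw [show d.keys = d.items.map Prod.fst from rfl]
      exact List.mem_map.mpr ⟨p, hperm.mem_iff.mp hp, he⟩
    exact (PySem.Dict.get?_eq_none_iff_not_mem_keys _ _).mp hg this
  · exact pvLook_of_mem_nodup _ _ _ hnd (hperm.mem_iff.mpr (PySem.Dict.mem_items_of_get?_eq_some _ hg))

-- ===== VERDICT =====
theorem compare_routine_spec : Claim_equal_compare_routine := by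
  intro single double _
  show _ = _
  simp only [compare_routine, compare_routine_alt]
  rw [pvA_foldl, List.nil_append]
  set sd := PySem.Dict.ofList single with hsd
  set dd := PySem.Dict.ofList double with hdd
  set sItems := PySem.List.sorted sd.items (fun kv => kv.1) with hsI
  set dItems := PySem.List.sorted dd.items (fun kv => kv.1) with hdI
  -- key lists of the sorted item lists: strictly increasing, perm of the dict keys
  have hpermS : (sItems.map Prod.fst).Perm sd.keys := (PySem.List.sorted_perm _ _ _).map Prod.fst
  have hpermD : (dItems.map Prod.fst).Perm dd.keys := (PySem.List.sorted_perm _ _ _).map Prod.fst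
  have hndS : (sItems.map Prod.fst).Nodup := hpermS.nodup_iff.mpr (PySem.Dict.nodup_keys_ofList single)
  have hndD : (dItems.map Prod.fst).Nodup := hpermD.nodup_iff.mpr (PySem.Dict.nodup_keys_ofList double)
  have hleS : (sItems.map Prod.fst).Pairwise (· ≤ ·) := by
    rw [List.pairwise_map]; exact PySem.List.sorted_pairwise _ _
  have hleD : (dItems.map Prod.fst).Pairwise (· ≤ ·) := by
    rw [List.pairwise_map]; exact PySem.List.sorted_pairwise _ _
  have hltS : (sItems.map Prod.fst).Pairwise (· < ·) := (hndS.and hleS).imp (fun h => lt_of_le_of_ne h.2 h.1)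
  have hltD : (dItems.map Prod.fst).Pairwise (· < ·) := (hndD.and hleD).imp (fun h => lt_of_le_of_ne h.2 h.1)
  -- the classifiers agree
  have hFL : pvF single double = pvFL sItems dItems := by
    funext k
    rw [pvF, pvFL, hsI, hdI, pvLook_sorted_items _ _ (PySem.Dict.nodup_keys_ofList _), pvLook_sorted_items _ _ (PySem.Dict.nodup_keys_ofList _), ← hsd, ← hdd]
  -- the sorted key union is the key merge
  have hmk : PySem.List.sorted ((PySem.Set.ofList sd.keys).union (PySem.Set.ofList dd.keys)) (fun x => x)
      = pvMergeK (sItems.map Prod.fst) (dItems.map Prod.fst) := by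
    apply PySem.List.sorted_eq_of_perm_of_pairwise_lt
    · apply (List.perm_ext_iff_of_nodup ((pairwise_pvMergeK _ _ hltS hltD).imp ne_of_lt)
        (PySem.Set.nodup_union _ _ (PySem.Set.nodup_ofList _))).mpr
      intro k
      rw [mem_pvMergeK, PySem.Set.mem_union, PySem.Set.mem_ofList, PySem.Set.mem_ofList,
        hpermS.mem_iff, hpermD.mem_iff]
    · exact pairwise_pvMergeK _ _ hltS hltD
  rw [hFL, hmk, ← pvMerge_eq sItems dItems hltS hltD]
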